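-- pv_equiv track=rewrite | github.com/AqeelAhmedBaloch/hackathon-II-todoapp-cli | phase-5/backend/app/services/ai_service.py | _mock_suggestion
-- ===== SOURCE A (Python) =====
-- def _mock_suggestion(title: str) -> dict:
--     title_lower = title.lower()
--     if any(w in title_lower for w in ["buy", "shop", "grocery"]):
--         return {"category": "Shopping", "priority": "Medium"}
--     if any(w in title_lower for w in ["call", "meeting", "email", "work"]):
--         return {"category": "Work", "priority": "High"}
--     if any(w in title_lower for w in ["doctor", "gym", "health", "workout"]):
--         return {"category": "Health", "priority": "High"}
--     return {"category": "Personal", "priority": "Low"}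
-- ===== SOURCE B (Python) =====
-- _KEYWORDS = [
--     ("buy", 0), ("shop", 0), ("grocery", 0),
--     ("call", 1), ("meeting", 1), ("email", 1), ("work", 1),
--     ("doctor", 2), ("gym", 2), ("health", 2), ("workout", 2),
-- ]
-- _RESULTS = [
--     {"category": "Shopping", "priority": "Medium"},
--     {"category": "Work", "priority": "High"},
--     {"category": "Health", "priority": "High"},
--     {"category": "Personal", "priority": "Low"},
-- ]
--
-- def _mock_suggestion(title: str) -> dict:
--     t = title.lower()
--     best = 3  # index of the Personal/Low default
--     for kw, idx in _KEYWORDS: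
--         if idx < best and kw in t:
--             best = idx
--     return dict(_RESULTS[best])
-- ===== Notes on version B (the rewrite author's own statement) =====
-- stated objective: alternative
-- what changed: B flattens the keywords into one (keyword, rule-index) table and makes a single accumulator pass keeping the minimum matching rule index, then indexes a results table, instead of A's ordered if/any branch chain.
import Mathlib
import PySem

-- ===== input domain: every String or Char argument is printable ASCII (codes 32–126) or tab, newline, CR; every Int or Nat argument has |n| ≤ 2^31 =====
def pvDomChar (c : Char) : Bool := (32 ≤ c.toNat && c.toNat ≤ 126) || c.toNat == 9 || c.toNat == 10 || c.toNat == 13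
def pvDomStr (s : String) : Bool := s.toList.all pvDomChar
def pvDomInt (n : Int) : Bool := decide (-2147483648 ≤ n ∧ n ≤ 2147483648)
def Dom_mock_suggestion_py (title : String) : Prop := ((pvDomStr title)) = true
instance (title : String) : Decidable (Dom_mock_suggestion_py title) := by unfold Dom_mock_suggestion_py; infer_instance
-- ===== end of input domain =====

-- ===== PORT A =====
-- B replaces A's ordered if/any branch chain with a min-index accumulator pass over a flat keyword table (alternative decomposition, same cost).
def mock_suggestion_py (title : String) : List (String × String) :=
  let title_lower := PySem.Str.lower title
  if ["buy", "shop", "grocery"].any (fun w => PySem.Str.isIn w title_lower) then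
    [("category", "Shopping"), ("priority", "Medium")]
  else if ["call", "meeting", "email", "work"].any (fun w => PySem.Str.isIn w title_lower) then
    [("category", "Work"), ("priority", "High")]
  else if ["doctor", "gym", "health", "workout"].any (fun w => PySem.Str.isIn w title_lower) then
    [("category", "Health"), ("priority", "High")]
  else
    [("category", "Personal"), ("priority", "Low")]

-- ===== PORT B =====
def pvKeywords : List (String × Nat) :=
  [ ("buy", 0), ("shop", 0), ("grocery", 0),
    ("call", 1), ("meeting", 1), ("email", 1), ("work", 1),
    ("doctor", 2), ("gym", 2), ("health", 2), ("workout", 2) ]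

def pvResults : List (List (String × String)) :=
  [ [("category", "Shopping"), ("priority", "Medium")],
    [("category", "Work"), ("priority", "High")],
    [("category", "Health"), ("priority", "High")],
    [("category", "Personal"), ("priority", "Low")] ]

def mock_suggestion_py_alt (title : String) : List (String × String) :=
  let t := PySem.Str.lower title
  let best := pvKeywords.foldl
    (fun best ki => if ki.2 < best && PySem.Str.isIn ki.1 t then ki.2 else best) 3
  pvResults.getD best []

-- ===== PRECONDITION & SPEC =====
def Spec_mock_suggestion_py (title : String) (out : List (String × String)) : Prop := out = mock_suggestion_py_alt title
instance (title : String) (out : List (String × String)) : Decidable (Spec_mock_suggestion_py title out) := by unfold Spec_mock_suggestion_py; infer_instance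

-- ===== CLAIM (what is proved, stated in full; the proofs are below) =====
def Claim_equal_mock_suggestion_py : Prop := ∀ (title : String), Dom_mock_suggestion_py title → Spec_mock_suggestion_py title (mock_suggestion_py title)

-- ===== LEMMAS AND PROOFS =====

theorem pv_fold_rule (q : String → Bool) (i : Nat) (ws : List String) (s : Nat) :
    (ws.map (fun w => (w, i))).foldl
        (fun best ki => if ki.2 < best && q ki.1 then ki.2 else best) s
      = if i < s && ws.any q then i else s := by
  induction ws generalizing s with
  | nil => simp
  | cons w ws ih =>
      simp only [List.map, List.foldl, List.any]
      rw [ih]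
      rcases Bool.eq_false_or_eq_true (q w) with hw | hw <;>
        by_cases hs : i < s <;>
        rcases Bool.eq_false_or_eq_true (ws.any q) with ha | ha <;>
        simp [hw, hs, ha]

theorem pv_key (q : String → Bool) :
    (if ["buy", "shop", "grocery"].any q then
      [("category", "Shopping"), ("priority", "Medium")]
    else if ["call", "meeting", "email", "work"].any q then
      [("category", "Work"), ("priority", "High")]
    else if ["doctor", "gym", "health", "workout"].any q then
      [("category", "Health"), ("priority", "High")]
    else
      [("category", "Personal"), ("priority", "Low")]) =
    pvResults.getD
      (pvKeywords.foldl (fun best ki => if ki.2 < best && q ki.1 then ki.2 else best) 3) [] := by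
  have hk : pvKeywords =
      (["buy", "shop", "grocery"].map (fun w => (w, 0))) ++
        ((["call", "meeting", "email", "work"].map (fun w => (w, 1))) ++
          (["doctor", "gym", "health", "workout"].map (fun w => (w, 2)))) := rfl
  rw [hk, List.foldl_append, List.foldl_append, pv_fold_rule, pv_fold_rule, pv_fold_rule]
  rcases Bool.eq_false_or_eq_true (["buy", "shop", "grocery"].any q) with hA | hA <;>
    rcases Bool.eq_false_or_eq_true (["call", "meeting", "email", "work"].any q) with hB | hB <;>
    rcases Bool.eq_false_or_eq_true (["doctor", "gym", "health", "workout"].any q) with hC | hC <;>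
    simp [hA, hB, hC, pvResults]

-- ===== VERDICT (by name: the statement is the Claim_ definition above) =====
theorem mock_suggestion_py_spec : Claim_equal_mock_suggestion_py := by
  intro title _
  unfold Spec_mock_suggestion_py mock_suggestion_py mock_suggestion_py_alt
  exact pv_key (fun w => PySem.Str.isIn w (PySem.Str.lower title))
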